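-- pv_equiv track=rewrite | github.com/lizlukasiewicz/daily-coding-problem | October/amazon_mice_difference.py | map_mice
-- ===== SOURCE A (Python) =====
-- def map_mice(mice: list, holes:list):
--   distance=0
--   for i in range(len(mice)):
--     left_hole=min(holes)
--     left_mouse=min(mice)
--     distance=max(distance, abs(left_hole-left_mouse))
--     mice.remove(left_mouse)
--     holes.remove(left_hole)
--   return distance
-- ===== SOURCE B (Python) =====
-- def map_mice(mice: list, holes: list):
--   return max((abs(h - m) for m, h in zip(sorted(mice), sorted(holes))), default=0)
-- ===== Notes on version B (the rewrite author's own statement) =====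
-- stated objective: faster
-- what changed: Replaces the repeated min()+remove() scan over both lists (quadratic, destructive) with sorting both lists once and taking the maximum absolute pairwise difference of the zipped sorted lists; return value only, B does not mutate its arguments.
import Mathlib
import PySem

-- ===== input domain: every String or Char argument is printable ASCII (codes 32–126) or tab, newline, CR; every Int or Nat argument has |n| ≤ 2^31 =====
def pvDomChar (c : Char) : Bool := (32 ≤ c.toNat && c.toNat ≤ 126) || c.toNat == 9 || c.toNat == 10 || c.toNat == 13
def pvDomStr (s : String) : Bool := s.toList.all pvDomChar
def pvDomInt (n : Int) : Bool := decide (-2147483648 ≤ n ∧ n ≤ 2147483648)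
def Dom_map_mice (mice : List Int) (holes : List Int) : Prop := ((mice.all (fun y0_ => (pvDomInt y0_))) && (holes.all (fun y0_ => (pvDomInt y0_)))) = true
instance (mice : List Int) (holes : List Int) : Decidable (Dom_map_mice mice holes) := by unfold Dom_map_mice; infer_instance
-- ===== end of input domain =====

-- B sorts both lists once and zips them instead of A's repeated min()+remove() scans (O(n log n) vs O(n^2));
-- return value only: A destructively empties `mice` and removes len(mice) holes, B does not mutate its arguments.


-- ===== PORT A =====
-- the for-loop over range(len(mice)): fuel = initial length of mice; each step takes the minimum of each
-- list, updates distance, and removes those minima.  min() of an empty list raises in Python; that path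
-- (reached iff holes is shorter than mice) is excluded by Pre_map_mice, the `| _, _ => d` arm is dead there.
def mapMiceLoop : Nat → Int → List Int → List Int → Int
  | 0, d, _, _ => d
  | n+1, d, mice, holes =>
    match PySem.List.min? holes (fun x => x), PySem.List.min? mice (fun x => x) with
    | some lh, some lm =>
        mapMiceLoop n (max d |lh - lm|)
          ((PySem.List.remove? mice lm).getD mice)
          ((PySem.List.remove? holes lh).getD holes)
    | _, _ => d

def map_mice (mice : List Int) (holes : List Int) : Int :=
  mapMiceLoop mice.length 0 mice holes

-- ===== PORT B =====
def map_mice_alt (mice : List Int) (holes : List Int) : Int :=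
  ((PySem.List.sorted mice (fun x => x) false).zip
     (PySem.List.sorted holes (fun x => x) false)).foldl
    (fun d p => max d |p.2 - p.1|) 0

-- ===== PRECONDITION & SPEC =====
-- A raises ValueError (min of empty holes) when mice is longer than holes; exactly those inputs are excluded.
def Pre_map_mice (mice : List Int) (holes : List Int) : Prop := mice.length ≤ holes.length
instance (mice : List Int) (holes : List Int) : Decidable (Pre_map_mice mice holes) := by unfold Pre_map_mice; infer_instance
def pvWitness_map_mice : List Int × List Int := ([3, -1, 4], [0, 2, 7, -5])

def Spec_map_mice (mice : List Int) (holes : List Int) (out : Int) : Prop := out = map_mice_alt mice holes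
instance (mice : List Int) (holes : List Int) (out : Int) : Decidable (Spec_map_mice mice holes out) := by unfold Spec_map_mice; infer_instance

-- ===== CLAIM (what is proved, stated in full; the proofs are below) =====
def Claim_equal_map_mice : Prop := ∀ (mice : List Int) (holes : List Int), Dom_map_mice mice holes → Pre_map_mice mice holes → Spec_map_mice mice holes (map_mice mice holes)

-- ===== LEMMAS AND PROOFS =====

-- min (no key) is the head of the stable sort: over Int the two candidate elements are ≤ each other, hence equal.
theorem min?_eq_head_sorted (xs : List Int) (y : Int) (t : List Int)
    (h : PySem.List.sorted xs (fun x => x) false = y :: t) :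
    PySem.List.min? xs (fun x => x) = some y := by
  have hxs : xs ≠ [] := by
    intro h0; rw [h0] at h; simp [PySem.List.sorted] at h
  obtain ⟨m, hm⟩ : ∃ m, PySem.List.min? xs (fun x => x) = some m := by
    cases hmin : PySem.List.min? xs (fun x => x) with
    | none => exact absurd ((PySem.List.min?_eq_none_iff xs (fun x => x)).mp hmin) hxs
    | some m => exact ⟨m, rfl⟩
  have hmem : m ∈ xs := PySem.List.min?_mem hm
  have hymem : y ∈ xs := by
    have : y ∈ PySem.List.sorted xs (fun x => x) false := by rw [h]; exact List.mem_cons_self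
    exact (PySem.List.mem_sorted xs (fun x => x) false y).mp this
  have h1 : y ≤ m := PySem.List.key_head_sorted_le xs (fun x => x) h m hmem
  have h2 : m ≤ y := PySem.List.min?_isMin hm y hymem
  rw [hm, le_antisymm h2 h1]

-- removing the head value of the sorted list leaves a list whose sort is the sorted tail
theorem sorted_erase_head (xs : List Int) (y : Int) (t : List Int)
    (h : PySem.List.sorted xs (fun x => x) false = y :: t) :
    PySem.List.sorted (xs.erase y) (fun x => x) false = t := by
  have hperm : (y :: t).Perm xs := by rw [← h]; exact PySem.List.sorted_perm xs (fun x => x) false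
  have hperm' : t.Perm (xs.erase y) := by
    have := hperm.erase y
    simpa using this
  have hpw : (y :: t).Pairwise (fun a b => a ≤ b) := by
    rw [← h]; exact PySem.List.sorted_pairwise xs (fun x => x)
  exact PySem.List.sorted_id_eq_of_perm_of_pairwise _ _ hperm' (List.Pairwise.of_cons hpw)

theorem loop_eq_foldl (n : Nat) : ∀ (d : Int) (mice holes : List Int),
    n = mice.length → mice.length ≤ holes.length →
    mapMiceLoop n d mice holes =
      ((PySem.List.sorted mice (fun x => x) false).zip
        (PySem.List.sorted holes (fun x => x) false)).foldl (fun d p => max d |p.2 - p.1|) d := by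
  induction n with
  | zero =>
    intro d mice holes hn _
    have hmice : mice = [] := by cases mice with
      | nil => rfl
      | cons a l => simp at hn
    subst hmice
    simp [mapMiceLoop, PySem.List.sorted]
  | succ k ih =>
    intro d mice holes hn hle
    -- mice nonempty, holes nonempty
    have hmne : mice ≠ [] := by intro h0; rw [h0] at hn; simp at hn
    have hhne : holes ≠ [] := by
      intro h0; rw [h0] at hle; simp at hle; rw [hle] at hn; simp at hn
    obtain ⟨m, tm, hsm⟩ : ∃ m tm, PySem.List.sorted mice (fun x => x) false = m :: tm := by
      cases hc : PySem.List.sorted mice (fun x => x) false with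
      | nil => exact absurd ((PySem.List.sorted_eq_nil_iff mice (fun x => x) false).mp hc) hmne
      | cons a l => exact ⟨a, l, rfl⟩
    obtain ⟨h, th, hsh⟩ : ∃ h th, PySem.List.sorted holes (fun x => x) false = h :: th := by
      cases hc : PySem.List.sorted holes (fun x => x) false with
      | nil => exact absurd ((PySem.List.sorted_eq_nil_iff holes (fun x => x) false).mp hc) hhne
      | cons a l => exact ⟨a, l, rfl⟩
    have hminm := min?_eq_head_sorted mice m tm hsm
    have hminh := min?_eq_head_sorted holes h th hsh
    have hmmem : m ∈ mice := PySem.List.min?_mem hminm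
    have hhmem : h ∈ holes := PySem.List.min?_mem hminh
    have hrm : PySem.List.remove? mice m = some (mice.erase m) :=
      PySem.List.remove?_eq_some_erase mice m hmmem
    have hrh : PySem.List.remove? holes h = some (holes.erase h) :=
      PySem.List.remove?_eq_some_erase holes h hhmem
    have hlm : (mice.erase m).length = k := by
      rw [List.length_erase_of_mem hmmem]; omega
    have hlh : (holes.erase h).length = holes.length - 1 := List.length_erase_of_mem hhmem
    have hle' : (mice.erase m).length ≤ (holes.erase h).length := by
      rw [hlm, hlh]; omega
    have hsm' := sorted_erase_head mice m tm hsm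
    have hsh' := sorted_erase_head holes h th hsh
    rw [show mapMiceLoop (k+1) d mice holes
          = mapMiceLoop k (max d |h - m|) ((PySem.List.remove? mice m).getD mice)
              ((PySem.List.remove? holes h).getD holes) by
        simp [mapMiceLoop, hminm, hminh]]
    rw [hrm, hrh]
    simp only [Option.getD_some]
    rw [ih (max d |h - m|) (mice.erase m) (holes.erase h) hlm.symm hle', hsm', hsh',
        hsm, hsh]
    simp [List.zip]

-- ===== VERDICT (by name: the statement is the Claim_ definition above) =====
theorem map_mice_spec : Claim_equal_map_mice := by
  intro mice holes _ hpre
  unfold Spec_map_mice map_mice map_mice_alt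
  exact loop_eq_foldl mice.length 0 mice holes rfl hpre
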